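-- pv_equiv track=rewrite | github.com/97YearsOldProgrammer/GeneT5 | lib/dataset/_blt_dataload.py | _length_sorted_chunks
-- ===== SOURCE A (Python) =====
-- def _length_sorted_chunks(source, sort_size=256):
--     """Accumulate samples, sort by total byte length, yield in order"""
--
--     pool = []
--     for sample in source:
--         pool.append(sample)
--         if len(pool) >= sort_size:
--             pool.sort(key=lambda s: len(s["input_ids"]))
--             yield from pool
--             pool = []
--
--     if pool:
--         pool.sort(key=lambda s: len(s["input_ids"]))
--         yield from pool
-- ===== SOURCE B (Python) =====
-- def _length_sorted_chunks(source, sort_size=256):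
--     """Slice the materialized source into fixed-size chunks front-first and
--     yield each chunk sorted by len(s["input_ids"]) -- no incremental pool,
--     no duplicated post-loop flush."""
--     items = list(source)
--     n = max(sort_size, 1)
--     while items:
--         chunk, items = items[:n], items[n:]
--         chunk.sort(key=lambda s: len(s["input_ids"]))
--         yield from chunk
-- ===== Notes on version B (the rewrite author's own statement) =====
-- stated objective: simpler
-- what changed: Replaces A's one-at-a-time pool accumulation with a length threshold plus a duplicated post-loop sort-and-flush by a single loop that slices fixed-size chunks off the front of the materialized list and yields each chunk sorted.
import Mathlib
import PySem

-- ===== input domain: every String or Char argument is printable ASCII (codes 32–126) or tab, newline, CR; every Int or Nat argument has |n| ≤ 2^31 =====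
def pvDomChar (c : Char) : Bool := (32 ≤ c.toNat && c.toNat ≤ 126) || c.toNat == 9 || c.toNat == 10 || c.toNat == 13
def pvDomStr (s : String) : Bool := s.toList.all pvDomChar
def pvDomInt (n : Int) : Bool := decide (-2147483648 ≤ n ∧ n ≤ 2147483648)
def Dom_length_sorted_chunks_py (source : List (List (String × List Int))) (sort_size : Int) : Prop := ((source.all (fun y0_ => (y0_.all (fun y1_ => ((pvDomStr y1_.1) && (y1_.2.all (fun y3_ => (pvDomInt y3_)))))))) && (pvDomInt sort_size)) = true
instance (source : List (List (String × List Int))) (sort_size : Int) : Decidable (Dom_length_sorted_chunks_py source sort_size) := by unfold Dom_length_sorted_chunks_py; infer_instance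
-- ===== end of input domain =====

-- B replaces A's one-at-a-time pool accumulation with threshold test and duplicated
-- post-loop flush by a single front-slicing loop over the materialized list (simpler).
-- Return-value equivalence only: both are generators in Python; neither mutates its argument.

-- key = len(s["input_ids"]) (total via getD; Pre_ excludes samples missing the key, where Python raises KeyError)
def lsKey (s : List (String × List Int)) : Nat :=
  ((PySem.Dict.mk s).getD "input_ids" []).length

-- ===== PORT A =====
def lscA (src : List (List (String × List Int))) (pool : List (List (String × List Int)))
    (sort_size : Int) : List (List (String × List Int)) :=
  match src with
  | [] => if pool.isEmpty then [] else PySem.List.sorted pool lsKey false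
  | sample :: rest =>
    let pool' := pool ++ [sample]
    if sort_size ≤ (pool'.length : Int) then
      PySem.List.sorted pool' lsKey false ++ lscA rest [] sort_size
    else
      lscA rest pool' sort_size

def length_sorted_chunks_py (source : List (List (String × List Int))) (sort_size : Int) : List (List (String × List Int)) :=
  lscA source [] sort_size

-- ===== PORT B =====
def lscB (items : List (List (String × List Int))) (n : Int) (hn : 1 ≤ n) : List (List (String × List Int)) :=
  if h : items = [] then []
  else
    PySem.List.sorted (PySem.List.slice items none (some n)) lsKey false ++
      lscB (PySem.List.slice items (some n) none) n hn
termination_by items.length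
decreasing_by
  rw [PySem.List.slice_from items (show (0:Int) ≤ n by omega)]
  have h0 : items.length ≠ 0 := fun h0 => h (List.eq_nil_of_length_eq_zero h0)
  have h1 : 1 ≤ n.toNat := by omega
  simp only [List.length_drop]; omega

def length_sorted_chunks_py_alt (source : List (List (String × List Int))) (sort_size : Int) : List (List (String × List Int)) :=
  lscB source (max sort_size 1) (le_max_right _ _)

-- ===== PRECONDITION & SPEC =====
-- Pre_ excludes exactly the inputs where A raises KeyError: a sample without the key "input_ids".
def Pre_length_sorted_chunks_py (source : List (List (String × List Int))) (sort_size : Int) : Prop :=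
  ∀ s ∈ source, (PySem.Dict.mk s).contains "input_ids" = true
instance (source : List (List (String × List Int))) (sort_size : Int) : Decidable (Pre_length_sorted_chunks_py source sort_size) := by unfold Pre_length_sorted_chunks_py; infer_instance

def pvWitness_length_sorted_chunks_py : (List (List (String × List Int))) × Int :=
  ([[("input_ids", [1, 2])], [("input_ids", [3])], [("input_ids", [])]], 2)

def Spec_length_sorted_chunks_py (source : List (List (String × List Int))) (sort_size : Int) (out : List (List (String × List Int))) : Prop := out = length_sorted_chunks_py_alt source sort_size
instance (source : List (List (String × List Int))) (sort_size : Int) (out : List (List (String × List Int))) : Decidable (Spec_length_sorted_chunks_py source sort_size out) := by unfold Spec_length_sorted_chunks_py; infer_instance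

-- ===== CLAIM (what is proved, stated in full; the proofs are below) =====
def Claim_equal_length_sorted_chunks_py : Prop := ∀ (source : List (List (String × List Int))) (sort_size : Int), Dom_length_sorted_chunks_py source sort_size → Pre_length_sorted_chunks_py source sort_size → Spec_length_sorted_chunks_py source sort_size (length_sorted_chunks_py source sort_size)

-- ===== LEMMAS AND PROOFS =====

-- B's recursion in take/drop form
lemma lscB_eq (items : List (List (String × List Int))) (n : Int) (hn : 1 ≤ n) :
    lscB items n hn =
      if items = [] then []
      else PySem.List.sorted (items.take n.toNat) lsKey false ++
        lscB (items.drop n.toNat) n hn := by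
  rw [lscB.eq_def]
  split_ifs with h
  · rfl
  · rw [PySem.List.slice_to items (show (0:Int) ≤ n by omega),
        PySem.List.slice_from items (show (0:Int) ≤ n by omega)]

-- the threshold test of A fires exactly when the pool reached (max sort_size 1).toNat elements
lemma threshold_iff (sort_size : Int) (m : Nat) (hm : 1 ≤ m) :
    (sort_size ≤ (m : Int)) ↔ (max sort_size 1).toNat ≤ m := by
  omega

-- main invariant: A's pool loop, started with a partial pool, is B's chunking of pool ++ src
lemma lscA_eq_lscB (sort_size : Int) (src pool : List (List (String × List Int)))
    (hp : pool.length < (max sort_size 1).toNat) :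
    lscA src pool sort_size = lscB (pool ++ src) (max sort_size 1) (le_max_right _ _) := by
  induction src generalizing pool with
  | nil =>
    rw [lscA, lscB_eq]
    simp only [List.append_nil]
    by_cases h : pool = []
    · simp [h]
    · have : ¬ pool.isEmpty := by simp [h]
      simp only [this, if_neg h, Bool.false_eq_true, if_false]
      rw [List.take_of_length_le (by omega), List.drop_eq_nil_of_le (by omega)]
      rw [lscB_eq]
      simp
  | cons x rest ih =>
    rw [lscA]
    have hlen : (pool ++ [x]).length = pool.length + 1 := by simp
    by_cases hc : sort_size ≤ ((pool ++ [x]).length : Int)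
    · -- chunk complete: (pool ++ [x]).length = (max sort_size 1).toNat
      have hfull : (pool ++ [x]).length = (max sort_size 1).toNat := by
        have := (threshold_iff sort_size (pool ++ [x]).length (by simp)).mp (by exact_mod_cast hc)
        omega
      rw [if_pos hc, ih [] (by simp)]
      rw [lscB_eq (pool ++ x :: rest)]
      have hne : pool ++ x :: rest ≠ [] := by simp
      rw [if_neg hne]
      have hsplit : pool ++ x :: rest = (pool ++ [x]) ++ rest := by simp
      rw [hsplit, List.take_append_of_le_length (by omega), List.drop_append_of_le_length (by omega)]
      rw [List.take_of_length_le (by omega), List.drop_eq_nil_of_le (by omega)]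
    · have hlt : (pool ++ [x]).length < (max sort_size 1).toNat := by
        rcases Nat.lt_or_ge (pool ++ [x]).length (max sort_size 1).toNat with h | h
        · exact h
        · exact absurd (by exact_mod_cast (threshold_iff sort_size _ (by simp)).mpr h) hc
      rw [if_neg hc, ih (pool ++ [x]) hlt]
      simp

-- ===== VERDICT (by name: the statement is the Claim_ definition above) =====
theorem length_sorted_chunks_py_spec : Claim_equal_length_sorted_chunks_py := by
  intro source sort_size _ _
  unfold Spec_length_sorted_chunks_py length_sorted_chunks_py length_sorted_chunks_py_alt
  have := lscA_eq_lscB sort_size source [] (by simp)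
  simpa using this
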